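-- pv_equiv track=rewrite | github.com/prathyush6/Set-summarization-using-differences | ReadFile3.py | feasibleLP
-- ===== SOURCE A (Python) =====
-- def feasibleLP(nx_s, ny_s, U, S, T):
--     feasible = 1
--     tComp = U - T
--     for i in tComp:
--         for j in range(0, len(S)):
--             sum1 = 0
--             if (i in S[j]) and (nx_s[j] == 1):
--                #sum1 = 0
--                for k in range(0, len(S)):
--                    if i in S[k]:
--                       sum1 = sum1 + ny_s[k]
--                if sum1 < nx_s[j]:
--                   feasible = 0
--     return feasible
-- ===== SOURCE B (Python) =====
-- def feasibleLP(nx_s, ny_s, U, S, T):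
--     tComp = U - T
--     # pass 1: which elements actually need coverage (appear in some chosen set, nx_s[j] == 1)
--     needed = set()
--     for j in range(len(S)):
--         hits = tComp.intersection(S[j])
--         if hits and nx_s[j] == 1:
--             needed |= hits
--     # pass 2: one transposed sweep accumulating each needed element's total coverage
--     cov = {i: 0 for i in needed}
--     for k in range(len(S)):
--         for e in set(S[k]):
--             if e in cov:
--                 cov[e] += ny_s[k]
--     return 0 if any(v < 1 for v in cov.values()) else 1
-- ===== Notes on version B (the rewrite author's own statement) =====
-- stated objective: faster
-- what changed: Instead of recomputing, for every (element, set) pair, the full sum of ny_s over all sets containing the element, B first collects the needed elements (those of U-T lying in some set with nx_s[j]==1), then accumulates each needed element's total coverage in one transposed pass over the sets, and finally checks all coverages against 1 at once.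
import Mathlib
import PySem

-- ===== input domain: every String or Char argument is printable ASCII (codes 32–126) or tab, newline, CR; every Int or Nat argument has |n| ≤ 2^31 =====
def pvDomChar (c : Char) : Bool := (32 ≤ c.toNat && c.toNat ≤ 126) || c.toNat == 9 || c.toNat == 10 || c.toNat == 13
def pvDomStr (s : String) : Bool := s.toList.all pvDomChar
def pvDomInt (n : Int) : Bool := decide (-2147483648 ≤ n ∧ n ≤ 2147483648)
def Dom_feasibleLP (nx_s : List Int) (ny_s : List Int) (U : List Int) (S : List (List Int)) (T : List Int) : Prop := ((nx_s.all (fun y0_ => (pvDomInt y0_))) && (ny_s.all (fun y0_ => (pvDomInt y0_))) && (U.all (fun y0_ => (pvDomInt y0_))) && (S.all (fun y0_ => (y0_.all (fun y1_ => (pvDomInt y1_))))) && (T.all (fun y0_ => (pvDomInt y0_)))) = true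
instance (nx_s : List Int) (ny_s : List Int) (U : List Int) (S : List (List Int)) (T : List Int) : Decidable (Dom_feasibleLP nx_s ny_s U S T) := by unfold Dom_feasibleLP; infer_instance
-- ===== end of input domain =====

-- B replaces A's per-(element,set) rescan of all sets by a needed-element pass, one transposed coverage pass and one check (faster).

-- ===== PORT A =====
def feasibleLP (nx_s : List Int) (ny_s : List Int) (U : List Int) (S : List (List Int)) (T : List Int) : Int :=
  let tComp : PySem.Set Int := PySem.Set.diff (PySem.Set.ofList U) T
  tComp.foldl (fun feasible i =>
    (PySem.List.pyRange 0 (S.length : Int) 1).foldl (fun feasible j =>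
      if i ∈ PySem.List.pyGetD S j [] ∧ PySem.List.pyGetD nx_s j 0 = 1 then
        let sum1 : Int := (PySem.List.pyRange 0 (S.length : Int) 1).foldl (fun sum1 k =>
          if i ∈ PySem.List.pyGetD S k [] then sum1 + PySem.List.pyGetD ny_s k 0 else sum1) 0
        if sum1 < PySem.List.pyGetD nx_s j 0 then 0 else feasible
      else feasible) feasible) 1

-- ===== PORT B =====
def feasibleLP_alt (nx_s : List Int) (ny_s : List Int) (U : List Int) (S : List (List Int)) (T : List Int) : Int :=
  let tComp : PySem.Set Int := PySem.Set.diff (PySem.Set.ofList U) T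
  let needed : PySem.Set Int := (PySem.List.pyRange 0 (S.length : Int) 1).foldl (fun nd j =>
    let hits := PySem.Set.inter tComp (PySem.List.pyGetD S j [])
    if hits ≠ [] ∧ PySem.List.pyGetD nx_s j 0 = 1 then PySem.Set.union nd hits else nd) PySem.Set.empty
  let cov0 : PySem.Dict Int Int := needed.foldl (fun d i => d.insert i 0) PySem.Dict.empty
  let cov : PySem.Dict Int Int := (PySem.List.pyRange 0 (S.length : Int) 1).foldl (fun d k =>
    (PySem.Set.ofList (PySem.List.pyGetD S k [])).foldl (fun d e =>
      if d.contains e then d.modify e 0 (· + PySem.List.pyGetD ny_s k 0) else d) d) cov0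
  if cov.values.any (fun v => decide (v < 1)) then 0 else 1

-- ===== PRECONDITION & SPEC =====
-- Pre_ excludes exactly the inputs on which A raises IndexError (some element of U − T lies in a set
-- S[j] with j ≥ len(nx_s), or, with nx_s[j] == 1, lies also in a set S[k] with k ≥ len(ny_s)); B's
-- guarded passes raise IndexError on exactly those inputs too, so nothing A returns on is excluded.
def Pre_feasibleLP (nx_s : List Int) (ny_s : List Int) (U : List Int) (S : List (List Int)) (T : List Int) : Prop :=
  ∀ i ∈ U, i ∉ T → ∀ j ∈ List.range S.length, i ∈ S.getD j [] →
    j < nx_s.length ∧ (nx_s.getD j 0 = 1 →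
      ∀ k ∈ List.range S.length, i ∈ S.getD k [] → k < ny_s.length)
instance (nx_s : List Int) (ny_s : List Int) (U : List Int) (S : List (List Int)) (T : List Int) : Decidable (Pre_feasibleLP nx_s ny_s U S T) := by unfold Pre_feasibleLP; infer_instance
def pvWitness_feasibleLP : List Int × List Int × List Int × List (List Int) × List Int := ([1], [1], [1], [[1]], [])

def Spec_feasibleLP (nx_s : List Int) (ny_s : List Int) (U : List Int) (S : List (List Int)) (T : List Int) (out : Int) : Prop := out = feasibleLP_alt nx_s ny_s U S T
instance (nx_s : List Int) (ny_s : List Int) (U : List Int) (S : List (List Int)) (T : List Int) (out : Int) : Decidable (Spec_feasibleLP nx_s ny_s U S T out) := by unfold Spec_feasibleLP; infer_instance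

-- ===== CLAIM (what is proved, stated in full; the proofs are below) =====
def Claim_equal_feasibleLP : Prop := ∀ (nx_s : List Int) (ny_s : List Int) (U : List Int) (S : List (List Int)) (T : List Int), Dom_feasibleLP nx_s ny_s U S T → Pre_feasibleLP nx_s ny_s U S T → Spec_feasibleLP nx_s ny_s U S T (feasibleLP nx_s ny_s U S T)

-- ===== LEMMAS AND PROOFS =====

-- proof-only abbreviations for the pieces the ports share (each is definitionally the port's let)
def pvTComp (U T : List Int) : PySem.Set Int := PySem.Set.diff (PySem.Set.ofList U) T
def pvRng (S : List (List Int)) : List Int := PySem.List.pyRange 0 (S.length : Int) 1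
def pvSum1 (ny_s : List Int) (S : List (List Int)) (i : Int) : Int :=
  (pvRng S).foldl (fun sum1 k =>
    if i ∈ PySem.List.pyGetD S k [] then sum1 + PySem.List.pyGetD ny_s k 0 else sum1) 0
def pvNeeded (nx_s : List Int) (S : List (List Int)) (U T : List Int) : PySem.Set Int :=
  (pvRng S).foldl (fun nd j =>
    let hits := PySem.Set.inter (pvTComp U T) (PySem.List.pyGetD S j [])
    if hits ≠ [] ∧ PySem.List.pyGetD nx_s j 0 = 1 then PySem.Set.union nd hits else nd) PySem.Set.empty
def pvCov0 (nx_s : List Int) (S : List (List Int)) (U T : List Int) : PySem.Dict Int Int :=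
  (pvNeeded nx_s S U T).foldl (fun d i => d.insert i 0) PySem.Dict.empty
def pvCov (nx_s ny_s : List Int) (S : List (List Int)) (U T : List Int) : PySem.Dict Int Int :=
  (pvRng S).foldl (fun d k =>
    (PySem.Set.ofList (PySem.List.pyGetD S k [])).foldl (fun d e =>
      if d.contains e then d.modify e 0 (· + PySem.List.pyGetD ny_s k 0) else d) d) (pvCov0 nx_s S U T)

-- A's nested "set feasible to 0 when the bad pair shows up" loop, as an existential.
theorem foldl_guard_zero {α : Type} (l : List α) (p q : α → Prop) [DecidablePred p] [DecidablePred q] (init : Int) :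
    l.foldl (fun a x => if p x then (if q x then 0 else a) else a) init
      = if ∃ x ∈ l, p x ∧ q x then 0 else init := by
  induction l generalizing init with
  | nil => simp
  | cons x l ih =>
    rw [List.foldl_cons, ih]
    by_cases hp : p x <;> by_cases hq : q x <;> simp [hp, hq]

theorem foldl_if_zero {α : Type} (l : List α) (p : α → Prop) [DecidablePred p] (init : Int) :
    l.foldl (fun a x => if p x then 0 else a) init = if ∃ x ∈ l, p x then 0 else init := by
  induction l generalizing init with
  | nil => simp
  | cons x l ih =>
    rw [List.foldl_cons, ih]
    by_cases hp : p x <;> simp [hp]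

-- A's whole double loop as a closed-form if
theorem A_closed (nx_s ny_s : List Int) (S : List (List Int)) (tC rng : List Int) :
    tC.foldl (fun (feasible : Int) i =>
      rng.foldl (fun feasible j =>
        if i ∈ PySem.List.pyGetD S j [] ∧ PySem.List.pyGetD nx_s j 0 = 1 then
          if rng.foldl (fun sum1 k =>
              if i ∈ PySem.List.pyGetD S k [] then sum1 + PySem.List.pyGetD ny_s k 0 else sum1) 0
              < PySem.List.pyGetD nx_s j 0 then 0 else feasible
        else feasible) feasible) (1 : Int)
    = if ∃ i ∈ tC, ∃ j ∈ rng,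
          (i ∈ PySem.List.pyGetD S j [] ∧ PySem.List.pyGetD nx_s j 0 = 1) ∧
          rng.foldl (fun sum1 k =>
              if i ∈ PySem.List.pyGetD S k [] then sum1 + PySem.List.pyGetD ny_s k 0 else sum1) 0
            < PySem.List.pyGetD nx_s j 0
      then 0 else 1 := by
  refine Eq.trans (List.foldl_ext (α := Int) (β := Int) _
      (fun a i => if ∃ j ∈ rng,
          (i ∈ PySem.List.pyGetD S j [] ∧ PySem.List.pyGetD nx_s j 0 = 1) ∧
          rng.foldl (fun sum1 k =>
              if i ∈ PySem.List.pyGetD S k [] then sum1 + PySem.List.pyGetD ny_s k 0 else sum1) 0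
            < PySem.List.pyGetD nx_s j 0
        then 0 else a)
      1 fun a i _ => foldl_guard_zero rng
        (fun j => i ∈ PySem.List.pyGetD S j [] ∧ PySem.List.pyGetD nx_s j 0 = 1)
        (fun j => rng.foldl (fun sum1 k =>
            if i ∈ PySem.List.pyGetD S k [] then sum1 + PySem.List.pyGetD ny_s k 0 else sum1) 0
            < PySem.List.pyGetD nx_s j 0) a)
    (foldl_if_zero tC _ 1)

-- membership in B's needed-building loop
theorem mem_foldl_union_if {α : Type} [BEq α] [LawfulBEq α] (l : List α) (p : α → Prop) [DecidablePred p]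
    (h : α → PySem.Set α) (acc : PySem.Set α) (i : α) :
    i ∈ l.foldl (fun nd j => if p j then PySem.Set.union nd (h j) else nd) acc
      ↔ i ∈ acc ∨ ∃ j ∈ l, p j ∧ i ∈ h j := by
  induction l generalizing acc with
  | nil => simp
  | cons x l ih =>
    rw [List.foldl_cons, ih]
    by_cases hp : p x
    · rw [if_pos hp]
      simp only [PySem.Set.mem_union, List.mem_cons]
      constructor
      · rintro (((h1 | h2) | ⟨j, hj, hpj, hij⟩))
        · exact Or.inl h1
        · exact Or.inr ⟨x, Or.inl rfl, hp, h2⟩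
        · exact Or.inr ⟨j, Or.inr hj, hpj, hij⟩
      · rintro (h1 | ⟨j, (rfl | hj), hpj, hij⟩)
        · exact Or.inl (Or.inl h1)
        · exact Or.inl (Or.inr hij)
        · exact Or.inr ⟨j, hj, hpj, hij⟩
    · rw [if_neg hp]
      simp only [List.mem_cons]
      constructor
      · rintro (h1 | ⟨j, hj, hpj, hij⟩)
        · exact Or.inl h1
        · exact Or.inr ⟨j, Or.inr hj, hpj, hij⟩
      · rintro (h1 | ⟨j, (rfl | hj), hpj, hij⟩)
        · exact Or.inl h1
        · exact absurd hpj hp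
        · exact Or.inr ⟨j, hj, hpj, hij⟩

theorem nodup_foldl_union_if {α : Type} [BEq α] [LawfulBEq α] (l : List α) (p : α → Prop) [DecidablePred p]
    (h : α → PySem.Set α) (acc : PySem.Set α) (hacc : acc.Nodup) :
    (l.foldl (fun nd j => if p j then PySem.Set.union nd (h j) else nd) acc).Nodup := by
  induction l generalizing acc with
  | nil => exact hacc
  | cons x l ih =>
    rw [List.foldl_cons]
    by_cases hp : p x
    · rw [if_pos hp]; exact ih _ (PySem.Set.nodup_union _ _ hacc)
    · rw [if_neg hp]; exact ih _ hacc

theorem mem_needed (nx_s : List Int) (S : List (List Int)) (U T : List Int) (i : Int) :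
    i ∈ pvNeeded nx_s S U T
      ↔ i ∈ pvTComp U T ∧ ∃ j ∈ pvRng S, i ∈ PySem.List.pyGetD S j [] ∧ PySem.List.pyGetD nx_s j 0 = 1 := by
  rw [pvNeeded]
  simp only []
  rw [mem_foldl_union_if (pvRng S)
      (fun j => PySem.Set.inter (pvTComp U T) (PySem.List.pyGetD S j []) ≠ [] ∧ PySem.List.pyGetD nx_s j 0 = 1)
      (fun j => PySem.Set.inter (pvTComp U T) (PySem.List.pyGetD S j []))]
  simp only [PySem.Set.mem_inter]
  constructor
  · rintro (h | ⟨j, hj, ⟨_, hx1⟩, hit, hiS⟩)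
    · exact absurd h (List.not_mem_nil)
    · exact ⟨hit, j, hj, hiS, hx1⟩
  · rintro ⟨hit, j, hj, hiS, hx1⟩
    refine Or.inr ⟨j, hj, ⟨?_, hx1⟩, hit, hiS⟩
    intro hnil
    have : i ∈ PySem.Set.inter (pvTComp U T) (PySem.List.pyGetD S j []) :=
      (PySem.Set.mem_inter _ _ i).mpr ⟨hit, hiS⟩
    rw [hnil] at this
    exact absurd this (List.not_mem_nil)

-- inserting 0 everywhere keeps every getD _ 0 at 0
theorem getD_foldl_insert_zero (l : List Int) (d : PySem.Dict Int Int) (i : Int) (h : d.getD i 0 = 0) :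
    (l.foldl (fun d x => d.insert x (0 : Int)) d).getD i 0 = 0 := by
  induction l generalizing d with
  | nil => simpa using h
  | cons x l ih =>
    rw [List.foldl_cons]
    exact ih _ (by rw [PySem.Dict.getD_insert]; split <;> simp [h])

-- one bucket pass of B's coverage loop: keys unchanged
theorem bucket_keys (l : List Int) (v : Int) (d : PySem.Dict Int Int) :
    (l.foldl (fun d e => if d.contains e then d.modify e 0 (· + v) else d) d).keys = d.keys := by
  induction l generalizing d with
  | nil => rfl
  | cons e l ih =>
    rw [List.foldl_cons, ih]
    by_cases hc : d.contains e = true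
    · rw [if_pos hc, PySem.Dict.keys_modify, PySem.Dict.keys_insert_of_contains _ _ hc]
    · rw [if_neg hc]

theorem bucket_contains (l : List Int) (v : Int) (d : PySem.Dict Int Int) (i : Int) :
    (l.foldl (fun d e => if d.contains e then d.modify e 0 (· + v) else d) d).contains i
      = d.contains i := by
  by_cases h : d.contains i = true
  · rw [h]
    exact (PySem.Dict.contains_iff_mem_keys _ _).mpr (by rw [bucket_keys]; exact (PySem.Dict.contains_iff_mem_keys _ _).mp h)
  · rw [Bool.eq_false_iff.mpr h]
    exact Bool.eq_false_iff.mpr (fun hc => h ((PySem.Dict.contains_iff_mem_keys _ _).mpr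
      (by rw [← bucket_keys l v d]; exact (PySem.Dict.contains_iff_mem_keys _ _).mp hc)))

-- one bucket pass of B's coverage loop: effect on one key
theorem bucket_getD (l : List Int) (hnd : l.Nodup) (v : Int) (d : PySem.Dict Int Int) (i : Int) :
    (l.foldl (fun d e => if d.contains e then d.modify e 0 (· + v) else d) d).getD i 0
      = if i ∈ l ∧ d.contains i = true then d.getD i 0 + v else d.getD i 0 := by
  induction l generalizing d with
  | nil => simp
  | cons e l ih =>
    rcases List.nodup_cons.mp hnd with ⟨he, hnd'⟩
    rw [List.foldl_cons, ih hnd']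
    have hcc : (if d.contains e then d.modify e 0 (· + v) else d).contains i = d.contains i := by
      by_cases hc : d.contains e = true
      · rw [if_pos hc, PySem.Dict.contains_modify]
        by_cases hie : i = e
        · subst hie; simp [hc]
        · simp [hie]
      · rw [if_neg hc]
    by_cases hie : i = e
    · subst hie
      have hnot : ¬ (i ∈ l ∧ (if d.contains i then d.modify i 0 (· + v) else d).contains i = true) :=
        fun h => he h.1
      rw [if_neg hnot]
      by_cases hc : d.contains i = true
      · rw [if_pos hc, PySem.Dict.getD_modify, if_pos rfl,
          if_pos (⟨List.mem_cons_self, hc⟩ : i ∈ i :: l ∧ d.contains i = true)]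
      · rw [if_neg hc, if_neg (fun h : i ∈ i :: l ∧ d.contains i = true => hc h.2)]
    · have hd1 : (if d.contains e then d.modify e 0 (· + v) else d).getD i 0 = d.getD i 0 := by
        by_cases hc : d.contains e = true
        · rw [if_pos hc, PySem.Dict.getD_modify, if_neg hie]
        · rw [if_neg hc]
      rw [hcc, hd1]
      have hm : (i ∈ e :: l) ↔ (i ∈ l) := by simp [List.mem_cons, hie]
      simp only [hm]

-- whole coverage loop: keys unchanged
theorem cover_keys (S : List (List Int)) (ny_s : List Int) (ks : List Int)
    (d : PySem.Dict Int Int) :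
    (ks.foldl (fun d k =>
      (PySem.Set.ofList (PySem.List.pyGetD S k [])).foldl (fun d e =>
        if d.contains e then d.modify e 0 (· + PySem.List.pyGetD ny_s k 0) else d) d) d).keys
      = d.keys := by
  induction ks generalizing d with
  | nil => rfl
  | cons k ks ih => rw [List.foldl_cons, ih, bucket_keys]

-- whole coverage loop: for a key already present, getD accumulates exactly A's inner sum
theorem cover_getD (S : List (List Int)) (ny_s : List Int) (ks : List Int)
    (d : PySem.Dict Int Int) (i : Int) (h : d.contains i = true) :
    (ks.foldl (fun d k =>
      (PySem.Set.ofList (PySem.List.pyGetD S k [])).foldl (fun d e =>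
        if d.contains e then d.modify e 0 (· + PySem.List.pyGetD ny_s k 0) else d) d) d).getD i 0
      = ks.foldl (fun sum1 k =>
          if i ∈ PySem.List.pyGetD S k [] then sum1 + PySem.List.pyGetD ny_s k 0 else sum1) (d.getD i 0) := by
  induction ks generalizing d with
  | nil => rfl
  | cons k ks ih =>
    rw [List.foldl_cons, List.foldl_cons, ih _ (by rw [bucket_contains]; exact h)]
    congr 1
    rw [bucket_getD _ (PySem.Set.nodup_ofList _) _ _ _]
    simp [PySem.Set.mem_ofList, h]

theorem feasibleLP_eq_alt (nx_s : List Int) (ny_s : List Int) (U : List Int)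
    (S : List (List Int)) (T : List Int) :
    feasibleLP nx_s ny_s U S T = feasibleLP_alt nx_s ny_s U S T := by
  have hnnd : (pvNeeded nx_s S U T).Nodup :=
    nodup_foldl_union_if _ _ _ _ List.nodup_nil
  have hkeys0 : (pvCov0 nx_s S U T).keys = pvNeeded nx_s S U T := by
    rw [pvCov0, PySem.Dict.keys_foldl_insert _ (fun _ _ => (0 : Int)), PySem.Dict.keys_empty,
      PySem.Set.update_nil_left]
    exact PySem.Set.ofList_eq_self_of_nodup _ hnnd
  have hkeys : (pvCov nx_s ny_s S U T).keys = pvNeeded nx_s S U T := by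
    rw [pvCov, cover_keys, hkeys0]
  have hval : ∀ i ∈ pvNeeded nx_s S U T, (pvCov nx_s ny_s S U T).getD i 0 = pvSum1 ny_s S i := by
    intro i hi
    rw [pvCov, cover_getD _ _ _ _ _ (by rw [PySem.Dict.contains_iff_mem_keys, hkeys0]; exact hi)]
    rw [pvCov0, getD_foldl_insert_zero _ _ _ (PySem.Dict.getD_empty i 0), pvSum1]
  have hA : feasibleLP nx_s ny_s U S T
      = if ∃ i ∈ pvTComp U T, ∃ j ∈ pvRng S,
            (i ∈ PySem.List.pyGetD S j [] ∧ PySem.List.pyGetD nx_s j 0 = 1) ∧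
            pvSum1 ny_s S i < PySem.List.pyGetD nx_s j 0
        then 0 else 1 := by
    unfold feasibleLP pvSum1 pvRng pvTComp
    exact A_closed nx_s ny_s S (PySem.Set.diff (PySem.Set.ofList U) T) (PySem.List.pyRange 0 (S.length : Int) 1)
  have hB : feasibleLP_alt nx_s ny_s U S T
      = if (pvCov nx_s ny_s S U T).values.any (fun v => decide (v < 1)) = true then 0 else 1 := rfl
  rw [hA, hB]
  have hvals : (pvCov nx_s ny_s S U T).values
      = (pvNeeded nx_s S U T).map (fun k => (pvCov nx_s ny_s S U T).getD k 0) := by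
    rw [PySem.Dict.values_eq_map_keys _ (by rw [hkeys]; exact hnnd) 0, hkeys]
  have hcond : (∃ i ∈ pvTComp U T, ∃ j ∈ pvRng S,
        (i ∈ PySem.List.pyGetD S j [] ∧ PySem.List.pyGetD nx_s j 0 = 1) ∧
        pvSum1 ny_s S i < PySem.List.pyGetD nx_s j 0)
      ↔ ((pvCov nx_s ny_s S U T).values.any (fun v => decide (v < 1))) = true := by
    rw [hvals]
    simp only [List.any_map, List.any_eq_true, Function.comp, decide_eq_true_eq]
    constructor
    · rintro ⟨i, hi, j, hj, ⟨hiS, hx1⟩, hlt⟩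
      have hn : i ∈ pvNeeded nx_s S U T := (mem_needed nx_s S U T i).mpr ⟨hi, j, hj, hiS, hx1⟩
      exact ⟨i, hn, by rw [hval i hn]; rw [hx1] at hlt; exact hlt⟩
    · rintro ⟨i, hn, hlt⟩
      obtain ⟨hi, j, hj, hiS, hx1⟩ := (mem_needed nx_s S U T i).mp hn
      exact ⟨i, hi, j, hj, ⟨hiS, hx1⟩, by rw [hx1, ← hval i hn]; exact hlt⟩
  by_cases hc : (∃ i ∈ pvTComp U T, ∃ j ∈ pvRng S,
      (i ∈ PySem.List.pyGetD S j [] ∧ PySem.List.pyGetD nx_s j 0 = 1) ∧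
      pvSum1 ny_s S i < PySem.List.pyGetD nx_s j 0)
  · rw [if_pos hc, if_pos (hcond.mp hc)]
  · rw [if_neg hc, if_neg (fun h => hc (hcond.mpr h))]

-- ===== VERDICT (by name: the statement is the Claim_ definition above) =====
theorem feasibleLP_spec : Claim_equal_feasibleLP := by
  intro nx_s ny_s U S T _ _
  exact feasibleLP_eq_alt nx_s ny_s U S T
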